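-- pv_equiv track=rewrite | github.com/Bennoama/Leetcode-Solutions | greatest-common-divisor-of-strings/solution.py | isDivisor
-- ===== SOURCE A (Python) =====
-- def isDivisor(s:str, divisor:str) -> bool:
--     lengthS = len(s)
--     lengthDivisor = len(divisor)
--     if (lengthDivisor == 0):
--         return False
--     numTimes = lengthS // lengthDivisor
--
--     acc = ""
--     for i in range(0, numTimes):
--         acc += divisor
--
--     return acc == s
-- ===== SOURCE B (Python) =====
-- def isDivisor(s: str, divisor: str) -> bool:
--     d = len(divisor)
--     if d == 0:
--         return False
--     for i in range(0, len(s), d):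
--         if s[i:i + d] != divisor:
--             return False
--     return True
-- ===== Notes on version B (the rewrite author's own statement) =====
-- stated objective: simpler
-- what changed: Instead of building the repeated string with an accumulator and comparing it to s at the end, B steps through s in divisor-sized blocks and compares each slice to divisor in place, returning False at the first mismatch (a short final block also mismatches).
import Mathlib
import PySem

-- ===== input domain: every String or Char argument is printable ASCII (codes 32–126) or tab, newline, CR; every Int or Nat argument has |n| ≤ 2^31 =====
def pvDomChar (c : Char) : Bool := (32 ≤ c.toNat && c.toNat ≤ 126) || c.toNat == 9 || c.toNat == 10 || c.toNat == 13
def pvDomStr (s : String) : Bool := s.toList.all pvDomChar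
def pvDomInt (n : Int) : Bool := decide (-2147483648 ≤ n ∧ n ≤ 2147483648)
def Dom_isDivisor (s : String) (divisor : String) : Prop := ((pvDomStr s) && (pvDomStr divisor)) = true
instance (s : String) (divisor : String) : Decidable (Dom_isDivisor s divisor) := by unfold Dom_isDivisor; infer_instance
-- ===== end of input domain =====

-- B checks each divisor-sized block of s in place with early exit instead of
-- rebuilding the repeated string in an accumulator; objective: simpler.

-- ===== PORT A =====
def isDivisor (s : String) (divisor : String) : Bool :=
  let lengthS : Int := PySem.Str.len s
  let lengthDivisor : Int := PySem.Str.len divisor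
  if lengthDivisor = 0 then false
  else
    let numTimes : Int := PySem.Int.floordiv lengthS lengthDivisor
    let acc : List Char :=
      (PySem.List.pyRange 0 numTimes).foldl (fun acc _ => acc ++ divisor.toList) []
    decide (acc = s.toList)

-- ===== PORT B =====
-- the 'for i in range(0, len(s), d): if s[i:i+d] != divisor: return False' loop, early exit as recursion
def pvBlocks (s d : List Char) : List Int → Bool
  | [] => true
  | i :: rest =>
      if PySem.List.slice s (some i) (some (i + (d.length : Int))) = d then pvBlocks s d rest
      else false

def isDivisor_alt (s : String) (divisor : String) : Bool :=
  let d : Int := PySem.Str.len divisor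
  if d = 0 then false
  else pvBlocks s.toList divisor.toList (PySem.List.pyRange 0 (PySem.Str.len s) d)

-- ===== PRECONDITION & SPEC =====
def Spec_isDivisor (s : String) (divisor : String) (out : Bool) : Prop := out = isDivisor_alt s divisor
instance (s : String) (divisor : String) (out : Bool) : Decidable (Spec_isDivisor s divisor out) := by unfold Spec_isDivisor; infer_instance

-- ===== CLAIM (what is proved, stated in full; the proofs are below) =====
def Claim_equal_isDivisor : Prop := ∀ (s : String) (divisor : String), Dom_isDivisor s divisor → Spec_isDivisor s divisor (isDivisor s divisor)

-- ===== LEMMAS AND PROOFS =====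

-- the accumulator loop builds q concatenated copies of ds
theorem pvRep_eq (ds : List Char) (l : List Int) :
    l.foldl (fun acc _ => acc ++ ds) [] = (List.replicate l.length ds).flatten := by
  rw [PySem.List.foldl_append_eq_flatMap (fun _ => ds) l []]
  induction l with
  | nil => rfl
  | cons x t ih => simp_all [List.flatMap_cons, List.replicate_succ]

-- the early-exit recursion is an 'all' over the index list
theorem pvBlocks_eq_all (s d : List Char) (l : List Int) :
    pvBlocks s d l = l.all (fun i => decide (PySem.List.slice s (some i) (some (i + (d.length : Int))) = d)) := by
  induction l with
  | nil => rfl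
  | cons i rest ih =>
      by_cases h : PySem.List.slice s (some i) (some (i + (d.length : Int))) = d <;>
        simp [pvBlocks, h, ih]

-- dropping k whole blocks from q concatenated copies leaves q-k copies
theorem pvDrop_flatten (ds : List Char) (q k : Nat) (hk : k ≤ q) :
    ((List.replicate q ds).flatten).drop (ds.length * k) = (List.replicate (q - k) ds).flatten := by
  induction k generalizing q with
  | zero => simp
  | succ k ih =>
      cases q with
      | zero => omega
      | succ q =>
          have h1 : ds.length * (k + 1) = ds.length + ds.length * k := by ring
          have h2 : q + 1 - (k + 1) = q - k := by omega
          rw [h1, List.replicate_succ, List.flatten_cons, ← List.drop_drop,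
            List.drop_left, ih q (by omega), h2]

-- the reverse direction: equal blocks reassemble into the concatenation
theorem pvAssemble (ds : List Char) :
    ∀ (q : Nat) (cs : List Char), cs.length = q * ds.length →
      (∀ k < q, (cs.drop (ds.length * k)).take ds.length = ds) →
      cs = (List.replicate q ds).flatten := by
  intro q
  induction q with
  | zero => intro cs h _; simpa using List.eq_nil_of_length_eq_zero (by omega)
  | succ q ih =>
      intro cs hlen hblk
      have h0 : cs.take ds.length = ds := by simpa using hblk 0 (by omega)
      have hsplit : cs = ds ++ cs.drop ds.length := by
        conv_lhs => rw [← List.take_append_drop ds.length cs, h0]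
      have hlen' : (cs.drop ds.length).length = q * ds.length := by
        have h1 : (q + 1) * ds.length = q * ds.length + ds.length := Nat.succ_mul q ds.length
        simp [List.length_drop]
        omega
      have hblk' : ∀ k < q, ((cs.drop ds.length).drop (ds.length * k)).take ds.length = ds := by
        intro k hk
        rw [List.drop_drop]
        have h1 : ds.length + ds.length * k = ds.length * (k + 1) := by ring
        rw [h1]
        exact hblk (k + 1) (by omega)
      rw [List.replicate_succ, List.flatten_cons, ← ih (cs.drop ds.length) hlen' hblk']
      exact hsplit

-- ceiling division agrees with floor division on multiples
theorem pvCeil_eq_of_dvd (n m : Nat) (hn : 0 < n) (h : n ∣ m) : (m + n - 1) / n = m / n := by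
  obtain ⟨t, rfl⟩ := h
  rcases Nat.eq_zero_or_pos t with rfl | ht
  · simp
    omega
  · have h1 : n * t + n - 1 = (n - 1) + n * t := by omega
    rw [h1, Nat.add_mul_div_left _ _ hn, Nat.div_eq_of_lt (show n - 1 < n by omega),
      Nat.mul_div_cancel_left _ hn]
    omega

-- and exceeds it when the remainder is positive
theorem pvCeil_gt (n m : Nat) (hn : 0 < n) (h : m % n ≠ 0) : m / n < (m + n - 1) / n := by
  have h1 := Nat.div_add_mod m n
  have h2 := Nat.mod_lt m hn
  have h3 : (m / n + 1) * n ≤ m + n - 1 := by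
    have h4 : (m / n + 1) * n = n * (m / n) + n := by ring
    omega
  have h5 := (Nat.le_div_iff_mul_le hn).mpr h3
  omega

-- central characterisation: A's final comparison equals B's per-block check
theorem pvKey (ds cs : List Char) (hn : 0 < ds.length) :
    ((List.replicate (cs.length / ds.length) ds).flatten = cs) ↔
      (∀ k < (cs.length + ds.length - 1) / ds.length,
        (cs.drop (ds.length * k)).take ds.length = ds) := by
  constructor
  · intro h k hk
    have hlen : cs.length = (cs.length / ds.length) * ds.length := by
      have h1 := congrArg List.length h
      simp [List.length_flatten, List.map_replicate] at h1
      omega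
    have hc := pvCeil_eq_of_dvd ds.length cs.length hn
      ⟨cs.length / ds.length, by rw [Nat.mul_comm]; omega⟩
    rw [hc] at hk
    rw [← h, pvDrop_flatten ds _ k (by omega)]
    have h2 : cs.length / ds.length - k = (cs.length / ds.length - k - 1) + 1 := by omega
    rw [h2, List.replicate_succ, List.flatten_cons, List.take_left]
  · intro h
    rcases Nat.eq_zero_or_pos (cs.length % ds.length) with hr | hr
    · have h1 := Nat.div_add_mod cs.length ds.length
      have hlen : cs.length = (cs.length / ds.length) * ds.length := by
        rw [Nat.mul_comm]; omega
      have hc := pvCeil_eq_of_dvd ds.length cs.length hn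
        ⟨cs.length / ds.length, by rw [Nat.mul_comm]; omega⟩
      exact (pvAssemble ds _ cs hlen (fun k hk => h k (by omega))).symm
    · exfalso
      have hq := pvCeil_gt ds.length cs.length hn (by omega)
      have hb := h (cs.length / ds.length) hq
      have h1 := Nat.div_add_mod cs.length ds.length
      have h2 := Nat.mod_lt cs.length hn
      have hlenb : ((cs.drop (ds.length * (cs.length / ds.length))).take ds.length).length
          = cs.length % ds.length := by
        simp [List.length_take, List.length_drop]
        omega
      have h3 := congrArg List.length hb
      rw [hlenb] at h3
      omega

-- the ceiling count produced by range(0, m, n)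
theorem pvRangeCount (m n : Nat) (hn : 0 < n) :
    PySem.List.pyRange 0 (m : Int) (n : Int) =
      (List.range ((m + n - 1) / n)).map (fun k => ((n * k : Nat) : Int)) := by
  rw [PySem.List.pyRange_of_pos 0 (m : Int) (by exact_mod_cast hn)]
  rcases Nat.eq_zero_or_pos m with rfl | hm
  · simp
    omega
  · have hlt : (0 : Int) < (m : Int) := by exact_mod_cast hm
    rw [if_pos hlt]
    have hcast : (((m : Int) - 0 + (n : Int) - 1) / (n : Int)).toNat = (m + n - 1) / n := by
      have h1 : ((m : Int) - 0 + (n : Int) - 1) = ((m + n - 1 : Nat) : Int) := by omega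
      rw [h1, ← Int.natCast_div, Int.toNat_natCast]
    rw [hcast]
    apply List.map_congr_left
    intro k _
    push_cast
    ring

theorem isDivisor_eq_alt (s divisor : String) : isDivisor s divisor = isDivisor_alt s divisor := by
  simp only [isDivisor, isDivisor_alt, PySem.Str.len_eq]
  rcases Nat.eq_zero_or_pos divisor.toList.length with h0 | hn
  · simp [h0]
  · have hne : ((divisor.toList.length : Int)) ≠ 0 := by omega
    rw [if_neg hne, if_neg hne]
    -- A side: accumulator = concatenation of len(s)//len(divisor) copies;
    -- B side: the loop is an 'all' over range(0, len(s), len(divisor))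
    simp only [PySem.Int.floordiv_natCast, PySem.List.pyRange_zero_natCast, pvRep_eq,
      List.length_map, List.length_range, pvBlocks_eq_all, pvRangeCount _ _ hn, List.all_map]
    rw [Bool.eq_iff_iff]
    simp only [decide_eq_true_eq, List.all_eq_true, List.mem_range, Function.comp]
    have hslice : ∀ k : Nat,
        PySem.List.slice s.toList (some ((divisor.toList.length * k : Nat) : Int))
          (some (((divisor.toList.length * k : Nat) : Int) + (divisor.toList.length : Int)))
          = (s.toList.drop (divisor.toList.length * k)).take divisor.toList.length := fun k =>
      PySem.List.slice_natCast_add s.toList (divisor.toList.length * k) divisor.toList.length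
    constructor
    · intro h k hk
      rw [hslice k]
      exact (pvKey divisor.toList s.toList hn).mp h k hk
    · intro h
      exact (pvKey divisor.toList s.toList hn).mpr (fun k hk => by rw [← hslice k]; exact h k hk)

-- ===== VERDICT (by name: the statement is the Claim_ definition above) =====
theorem isDivisor_spec : Claim_equal_isDivisor := by
  intro s divisor _
  unfold Spec_isDivisor
  exact isDivisor_eq_alt s divisor
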